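-- pv_equiv track=rewrite | github.com/vichitr/HacktoberfestForBeginners | Hackerrank/Python/IPK/RecursionAndBacktracking/RecursionDavisStaircase.py | solve
-- ===== SOURCE A (Python) =====
-- MOD = 10000000007
--
-- def solve(n):
--     dp = [0] * max(3, n + 1)
--     dp[0] = 1
--     dp[1] = 1
--     dp[2] = dp[1] + dp[0]
--
--     for i in range(3, n + 1):
--         dp[i] = (dp[i - 1] + dp[i - 2] + dp[i - 3]) % MOD
--
--     return dp[n]
-- ===== SOURCE B (Python) =====
-- MOD = 10000000007
--
-- def _mat_mul(X, Y):
--     return tuple(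
--         tuple(sum(X[i][k] * Y[k][j] for k in range(3)) % MOD for j in range(3))
--         for i in range(3)
--     )
--
-- def solve(n):
--     if n < 3:
--         return (1, 1, 2)[n]
--     M = ((1, 1, 1), (1, 0, 0), (0, 1, 0))
--     R = ((1, 0, 0), (0, 1, 0), (0, 0, 1))
--     e = n - 2
--     while e:
--         if e & 1:
--             R = _mat_mul(R, M)
--         M = _mat_mul(M, M)
--         e >>= 1
--     return (R[0][0] * 2 + R[0][1] * 1 + R[0][2] * 1) % MOD
-- ===== Notes on version B (the rewrite author's own statement) =====
-- stated objective: faster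
-- what changed: Replaces A's O(n) dp-table recurrence with binary exponentiation of the 3x3 tribonacci transition matrix mod MOD.
-- outside the precondition, e.g. on solve(-4): A raises IndexError, B raises IndexError
import Mathlib
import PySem

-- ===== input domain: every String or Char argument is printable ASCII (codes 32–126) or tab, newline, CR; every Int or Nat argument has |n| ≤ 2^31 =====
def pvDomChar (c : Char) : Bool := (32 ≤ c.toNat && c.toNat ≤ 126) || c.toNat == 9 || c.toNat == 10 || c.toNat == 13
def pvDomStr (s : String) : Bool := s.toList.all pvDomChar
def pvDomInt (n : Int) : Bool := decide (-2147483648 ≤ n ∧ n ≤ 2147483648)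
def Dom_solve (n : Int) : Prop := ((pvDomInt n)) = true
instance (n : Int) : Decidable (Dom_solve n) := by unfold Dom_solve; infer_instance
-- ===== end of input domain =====

-- B replaces A's linear dp table with binary exponentiation of the 3×3 transition matrix
-- mod MOD (objective: faster — O(log n) matrix multiplications instead of O(n) additions).

-- ===== PORT A =====
def MOD : Int := 10000000007

-- loop body of A's 'for i in range(3, n + 1)': dp is a Python list = mutable array; the
-- loop's indices i-1, i-2, i-3, i are all in [0, len(dp)) since 3 ≤ i ≤ n, so .toNat/getD/set!
-- are exact Python indexing here
def stepA (dp : Array Int) (i : Int) : Array Int :=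
  dp.set! i.toNat
    (PySem.Int.mod
      (dp.getD (i - 1).toNat 0 + dp.getD (i - 2).toNat 0 + dp.getD (i - 3).toNat 0) MOD)

def solve (n : Int) : Int :=
  let dp := Array.replicate (max 3 (n + 1)).toNat (0 : Int)
  let dp := dp.set! 0 1
  let dp := dp.set! 1 1
  let dp := dp.set! 2 (dp.getD 1 0 + dp.getD 0 0)
  let dp := (PySem.List.pyRange 3 (n + 1) 1).foldl stepA dp
  -- dp[n]: Python indexing incl. negative wraparound (IndexError, i.e. none, outside Pre_)
  (PySem.List.pyGet? dp.toList n).getD 0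

-- ===== PORT B =====
-- 3×3 integer matrix as a tuple of rows
abbrev M3 := (Int × Int × Int) × (Int × Int × Int) × (Int × Int × Int)

-- Source B's _mat_mul: every entry reduced mod MOD
def matMul (X Y : M3) : M3 :=
  match X, Y with
  | ((a, b, c), (d, e, f), (g, h, i)), ((p, q, r), (s, t, u), (v, w, x)) =>
    ((PySem.Int.mod (a*p + b*s + c*v) MOD, PySem.Int.mod (a*q + b*t + c*w) MOD,
        PySem.Int.mod (a*r + b*u + c*x) MOD),
     (PySem.Int.mod (d*p + e*s + f*v) MOD, PySem.Int.mod (d*q + e*t + f*w) MOD,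
        PySem.Int.mod (d*r + e*u + f*x) MOD),
     (PySem.Int.mod (g*p + h*s + i*v) MOD, PySem.Int.mod (g*q + h*t + i*w) MOD,
        PySem.Int.mod (g*r + h*u + i*x) MOD))

-- the 'while e:' binary-exponentiation loop of Source B (state M, R; e halves each turn)
def powLoop (M R : M3) (e : Nat) : M3 :=
  if e = 0 then R
  else powLoop (matMul M M) (if e % 2 = 1 then matMul R M else R) (e / 2)
termination_by e
decreasing_by exact Nat.div_lt_self (Nat.pos_of_ne_zero (by assumption)) (by omega)

def solve_alt (n : Int) : Int :=
  if n < 3 then PySem.List.pyGetD [1, 1, 2] n 0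
  else
    let R := powLoop ((1, 1, 1), (1, 0, 0), (0, 1, 0)) ((1, 0, 0), (0, 1, 0), (0, 0, 1))
        (n - 2).toNat
    PySem.Int.mod (R.1.1 * 2 + R.1.2.1 * 1 + R.1.2.2 * 1) MOD

-- ===== PRECONDITION & SPEC =====
-- Pre_ excludes only n ≤ -4, on which A raises IndexError (dp[n] out of range); B raises there too.
def Pre_solve (n : Int) : Prop := -3 ≤ n
instance (n : Int) : Decidable (Pre_solve n) := by unfold Pre_solve; infer_instance
def pvWitness_solve : Int := 7

def Spec_solve (n : Int) (out : Int) : Prop := out = solve_alt n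
instance (n : Int) (out : Int) : Decidable (Spec_solve n out) := by unfold Spec_solve; infer_instance

-- ===== CLAIM (what is proved, stated in full; the proofs are below) =====
def Claim_equal_solve : Prop := ∀ (n : Int), Dom_solve n → Pre_solve n → Spec_solve n (solve n)

-- ===== LEMMAS AND PROOFS =====

-- the tribonacci-mod-MOD sequence: the common specification of both ports
def trib : Nat → Int
  | 0 => 1
  | 1 => 1
  | 2 => 2
  | (k + 3) => (trib (k + 2) + trib (k + 1) + trib k) % MOD

theorem hMODpos : (0:Int) < MOD := by unfold MOD; decide

theorem trib_bounds : ∀ k, 0 ≤ trib k ∧ trib k < MOD := by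
  intro k
  match k with
  | 0 | 1 | 2 => unfold MOD; constructor <;> decide
  | (k + 3) =>
    exact ⟨Int.emod_nonneg _ (by unfold MOD; decide), Int.emod_lt_of_pos _ hMODpos⟩

-- ---- A side: the dp fold computes trib ----

def dpInit (N : Nat) : List Int := 1 :: 1 :: 2 :: List.replicate (N - 2) 0

-- stepA's action on toList, as a pure list function (proof helper)
def stepL (dp : List Int) (i : Int) : List Int :=
  dp.set i.toNat
    (PySem.Int.mod (dp.getD (i - 1).toNat 0 + dp.getD (i - 2).toNat 0 + dp.getD (i - 3).toNat 0) MOD)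

theorem arr_getD (a : Array Int) (i : Nat) (d : Int) : a.getD i d = a.toList.getD i d := by
  rcases a with ⟨l⟩
  simp [Array.getD, List.getD]
  split <;> simp_all

theorem toList_stepA (dp : Array Int) (i : Int) : (stepA dp i).toList = stepL dp.toList i := by
  unfold stepA stepL
  rw [show @Array.set! = @Array.setIfInBounds from rfl]
  rw [Array.toList_setIfInBounds, arr_getD, arr_getD, arr_getD]

theorem foldl_toList (xs : List Int) (a : Array Int) :
    (xs.foldl stepA a).toList = xs.foldl stepL a.toList := by
  induction xs generalizing a with
  | nil => rfl
  | cons x xs ih => simp [List.foldl_cons, ih, toList_stepA]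

theorem dpInit_length (N : Nat) (h : 3 ≤ N) : (dpInit N).length = N + 1 := by
  simp [dpInit]; omega

theorem fold_inv (N : Nat) (hN : 3 ≤ N) (m : Nat) (hm : m + 3 ≤ N + 1) :
    ((PySem.List.pyRange 3 (3 + (m:Int)) 1).foldl stepL (dpInit N)).length = N + 1 ∧
    ∀ j : Nat, j < m + 3 →
      ((PySem.List.pyRange 3 (3 + (m:Int)) 1).foldl stepL (dpInit N)).getD j 0 = trib j := by
  induction m with
  | zero =>
    rw [show ((3:Int) + (0:Nat) = 3) by norm_num, PySem.List.pyRange_one_eq_nil le_rfl]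
    refine ⟨dpInit_length N hN, ?_⟩
    intro j hj
    match j, hj with
    | 0, _ => rfl
    | 1, _ => rfl
    | 2, _ => rfl
  | succ m ih =>
    have hm' : m + 3 ≤ N + 1 := by omega
    obtain ⟨hlen, hget⟩ := ih hm'
    have hsplit : PySem.List.pyRange 3 (3 + ((m+1:Nat):Int)) 1
        = PySem.List.pyRange 3 (3 + (m:Int)) 1 ++ [3 + (m:Int)] := by
      have : (3 + ((m+1:Nat):Int)) = (3 + (m:Int)) + 1 := by omega
      rw [this, PySem.List.pyRange_one_succ_right (by omega)]
    rw [hsplit, List.foldl_append]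
    set L := (PySem.List.pyRange 3 (3 + (m:Int)) 1).foldl stepL (dpInit N) with hL
    have hstep : stepL L (3 + (m:Int)) = L.set (m+3) (trib (m+3)) := by
      unfold stepL
      rw [show ((3 + (m:Int)) - 1).toNat = m + 2 by omega,
          show ((3 + (m:Int)) - 2).toNat = m + 1 by omega,
          show ((3 + (m:Int)) - 3).toNat = m by omega,
          show (3 + (m:Int)).toNat = m + 3 by omega]
      rw [hget (m+2) (by omega), hget (m+1) (by omega), hget m (by omega)]
      rw [PySem.Int.mod_eq_emod_of_pos hMODpos]
      rfl
    simp only [List.foldl_cons, List.foldl_nil]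
    rw [hstep]
    constructor
    · simp [hlen]
    · intro j hj
      have hj3 : m + 3 < L.length := by omega
      by_cases hj' : j = m + 3
      · subst hj'
        simp [List.getD, hj3]
      · have : j < m + 3 := by omega
        rw [List.getD, List.getElem?_set_ne (by omega)]
        exact hget j this

theorem solve_eq_trib (n : Int) (h : 3 ≤ n) : solve n = trib n.toNat := by
  set N := n.toNat with hNdef
  have hN : 3 ≤ N := by omega
  have hn : n = (N:Int) := by omega
  have hcnt : (max 3 (n + 1)).toNat = (N - 2) + 3 := by omega
  have hrange : (3 : Int) + ((N - 2 : Nat) : Int) = n + 1 := by omega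
  obtain ⟨hlen, hget⟩ := fold_inv N hN (N - 2) (by omega)
  unfold solve
  dsimp only
  rw [hcnt]
  rw [show @Array.set! = @Array.setIfInBounds from rfl]
  have hinit : ((((Array.replicate ((N-2) + 3) (0:Int)).setIfInBounds 0 1).setIfInBounds 1 1).setIfInBounds 2
      ((((Array.replicate ((N-2) + 3) (0:Int)).setIfInBounds 0 1).setIfInBounds 1 1).getD 1 0
        + (((Array.replicate ((N-2) + 3) (0:Int)).setIfInBounds 0 1).setIfInBounds 1 1).getD 0 0)).toList
      = dpInit N := by
    simp [Array.toList_setIfInBounds, List.replicate_succ, dpInit]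
  rw [foldl_toList, hinit, ← hrange, hn]
  rw [PySem.List.pyGet?_natCast]
  have := hget N (by omega)
  rw [List.getD] at this
  rw [this]

-- ---- B side: powLoop computes matrix powers over ZMod, whose first row gives trib ----

abbrev ZM := ZMod 10000000007

def toMat (X : M3) : Matrix (Fin 3) (Fin 3) ZM :=
  !![(X.1.1 : ZM), (X.1.2.1 : ZM), (X.1.2.2 : ZM);
     (X.2.1.1 : ZM), (X.2.1.2.1 : ZM), (X.2.1.2.2 : ZM);
     (X.2.2.1 : ZM), (X.2.2.2.1 : ZM), (X.2.2.2.2 : ZM)]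

theorem cast_mod_MOD (a : Int) : ((PySem.Int.mod a MOD : Int) : ZM) = (a : ZM) := by
  rw [PySem.Int.mod_eq_emod_of_pos hMODpos]
  have : ((10000000007 : Nat) : Int) = MOD := by unfold MOD; rfl
  rw [← this]
  exact ZMod.intCast_mod a 10000000007

set_option maxHeartbeats 1000000 in
theorem toMat_mul (X Y : M3) : toMat (matMul X Y) = toMat X * toMat Y := by
  obtain ⟨⟨a, b, c⟩, ⟨d, e, f⟩, ⟨g, h, i⟩⟩ := X
  obtain ⟨⟨p, q, r⟩, ⟨s, t, u⟩, ⟨v, w, x⟩⟩ := Y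
  show toMat _ = (!![(a:ZM), b, c; d, e, f; g, h, i] : Matrix (Fin 3) (Fin 3) ZM)
      * !![(p:ZM), q, r; s, t, u; v, w, x]
  rw [Matrix.mul_fin_three]
  ext ii jj
  fin_cases ii <;> fin_cases jj <;> simp [toMat, matMul, cast_mod_MOD]

theorem powLoop_spec (M R : M3) (e : Nat) :
    toMat (powLoop M R e) = toMat R * (toMat M) ^ e := by
  induction e using Nat.strong_induction_on generalizing M R with
  | _ e ih =>
    by_cases h0 : e = 0
    · subst h0; rw [powLoop]; simp
    · rw [powLoop, if_neg h0]
      rw [ih (e / 2) (Nat.div_lt_self (Nat.pos_of_ne_zero h0) (by omega)), toMat_mul]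
      have hsq : toMat M * toMat M = toMat M ^ 2 := (sq (toMat M)).symm
      rw [hsq, ← pow_mul]
      by_cases hodd : e % 2 = 1
      · rw [if_pos hodd, toMat_mul, mul_assoc]
        conv_rhs => rw [show e = 2 * (e / 2) + 1 by omega, pow_succ']
      · rw [if_neg hodd]
        have h2 := Nat.mod_two_eq_zero_or_one e
        conv_rhs => rw [show e = 2 * (e / 2) by omega]

def Mm : M3 := ((1, 1, 1), (1, 0, 0), (0, 1, 0))

def tvec (k : Nat) : Fin 3 → ZM :=
  ![((trib (k+2) : Int) : ZM), ((trib (k+1) : Int) : ZM), ((trib k : Int) : ZM)]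

theorem pow_mulVec (k : Nat) : Matrix.mulVec ((toMat Mm) ^ k) (tvec 0) = tvec k := by
  induction k with
  | zero => simp [Matrix.one_mulVec]
  | succ k ih =>
    rw [pow_succ', ← Matrix.mulVec_mulVec, ih]
    ext i
    fin_cases i <;>
      simp [toMat, Mm, tvec, Matrix.mulVec, dotProduct, Fin.sum_univ_three]
    · show _ = ((trib (k+3) : Int) : ZM)
      rw [show trib (k+3) = (trib (k + 2) + trib (k + 1) + trib k) % MOD from rfl]
      rw [← PySem.Int.mod_eq_emod_of_pos hMODpos, cast_mod_MOD]
      push_cast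
      ring

theorem idMat : toMat ((1,0,0),(0,1,0),(0,0,1)) = 1 := by
  ext i j
  fin_cases i <;> fin_cases j <;> simp [toMat]

theorem eq_of_cast (a b : Int) (h : (a:ZM) = (b:ZM)) (ha : 0 ≤ a) (ha2 : a < MOD)
    (hb : 0 ≤ b) (hb2 : b < MOD) : a = b := by
  rw [ZMod.intCast_eq_intCast_iff] at h
  have hd : ((10000000007:Nat):Int) ∣ b - a := h.dvd
  unfold MOD at *
  omega

theorem solve_alt_eq (n : Int) (h : 3 ≤ n) : solve_alt n = trib n.toNat := by
  have hlt : ¬ n < 3 := by omega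
  have hen : (n - 2).toNat + 2 = n.toNat := by omega
  unfold solve_alt
  rw [if_neg hlt]
  set e := (n - 2).toNat with he
  set R := powLoop ((1, 1, 1), (1, 0, 0), (0, 1, 0)) ((1, 0, 0), (0, 1, 0), (0, 0, 1)) e with hR
  have hspec : toMat R = (toMat Mm) ^ e := by
    rw [hR, show ((1,1,1),(1,0,0),(0,1,0)) = Mm from rfl, powLoop_spec, idMat, one_mul]
  have h00 : ((R.1.1 : Int) : ZM) = (toMat Mm ^ e) 0 0 := by rw [← hspec]; simp [toMat]
  have h01 : ((R.1.2.1 : Int) : ZM) = (toMat Mm ^ e) 0 1 := by rw [← hspec]; simp [toMat]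
  have h02 : ((R.1.2.2 : Int) : ZM) = (toMat Mm ^ e) 0 2 := by rw [← hspec]; simp [toMat]
  have hv := congrFun (pow_mulVec e) 0
  simp [Matrix.mulVec, dotProduct, Fin.sum_univ_three, tvec, trib] at hv
  apply eq_of_cast
  · rw [cast_mod_MOD, ← hen]
    push_cast
    rw [h00, h01, h02]
    linear_combination hv
  · exact PySem.Int.mod_nonneg _ hMODpos
  · exact PySem.Int.mod_lt _ hMODpos
  · exact (trib_bounds _).1
  · exact (trib_bounds _).2

-- ===== VERDICT (by name: the statement is the Claim_ definition above) =====
theorem solve_spec : Claim_equal_solve := by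
  intro n _ hpre
  unfold Pre_solve at hpre
  unfold Spec_solve
  by_cases h : n < 3
  · interval_cases n <;> decide
  · rw [solve_eq_trib n (by omega), solve_alt_eq n (by omega)]
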